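-- pv_equiv track=rewrite | github.com/RSET-CSE-DEPARTMENT/RSET2022-26-S8-Alpha | Group-10/javaop.py | remove_dead_assignments
-- ===== SOURCE A (Python) =====
-- def remove_dead_assignments(lines):
--
--     live = set()
--     new_lines = []
--
--     for line in lines:
--
--         if "println(" in line:
--
--             var = line.split("(")[1].split(")")[0]
--
--             if var.isidentifier():
--                 live.add(var)
--
--     for line in reversed(lines):
--
--         if "=" in line and "int" in line:
--
--             var = line.split("=")[0].replace("int", "").strip()
--
--             if var not in live:
--                 continue
--
--             live.discard(var)
--
--         new_lines.append(line)
--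
--     return list(reversed(new_lines))
-- ===== SOURCE B (Python) =====
-- def remove_dead_assignments(lines):
--
--     live = {line.split("(")[1].split(")")[0]
--             for line in lines
--             if "println(" in line and line.split("(")[1].split(")")[0].isidentifier()}
--
--     out = []
--     for i, line in enumerate(lines):
--         if "=" in line and "int" in line:
--             var = line.split("=")[0].replace("int", "").strip()
--             if var not in live or any(
--                 "=" in later and "int" in later
--                 and later.split("=")[0].replace("int", "").strip() == var
--                 for later in lines[i + 1:]
--             ):
--                 continue
--         out.append(line)
--     return out
-- ===== Notes on version B (the rewrite author's own statement) =====
-- stated objective: alternative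
-- what changed: Replaces A's backward scan that mutates a liveness set (plus a final reverse) by a single forward comprehension-style pass that keeps an int-assignment exactly when its variable is live and no later int-assignment targets the same variable.
import Mathlib
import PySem

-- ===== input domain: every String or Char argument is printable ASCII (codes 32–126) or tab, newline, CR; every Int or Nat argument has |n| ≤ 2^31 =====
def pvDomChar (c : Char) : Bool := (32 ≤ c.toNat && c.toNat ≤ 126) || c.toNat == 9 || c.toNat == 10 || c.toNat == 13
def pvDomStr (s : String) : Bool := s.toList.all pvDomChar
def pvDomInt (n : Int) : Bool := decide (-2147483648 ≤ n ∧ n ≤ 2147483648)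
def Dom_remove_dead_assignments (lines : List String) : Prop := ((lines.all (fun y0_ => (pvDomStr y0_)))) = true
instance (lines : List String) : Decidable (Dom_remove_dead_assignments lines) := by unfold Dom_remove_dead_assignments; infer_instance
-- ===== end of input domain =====

-- B replaces A's backward scan over the lines with a mutated liveness set (plus a final reverse)
-- by a single forward pass that keeps an int-assignment iff its variable is live and no later
-- int-assignment targets the same variable (objective: alternative decomposition, not faster).

-- shared parsing helpers: both Pythons contain these expressions verbatim
-- str.isidentifier(), exact on the ASCII domain: [A-Za-z_][A-Za-z0-9_]*
def pvIsIdent (s : String) : Bool :=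
  match s.toList with
  | [] => false
  | c :: cs => (PySem.Chars.isalpha c || c == '_') && cs.all (fun d => PySem.Chars.isalnum d || d == '_')

-- line.split("(")[1].split(")")[0]; guarded by '"println(" in line', so [1] and [0] never raise
def pvPrintVar (line : String) : String :=
  (((PySem.Str.split? ((PySem.List.pyGet? ((PySem.Str.split? line "(").getD []) 1).getD "") ")").getD []).headD "")

-- line.split("=")[0].replace("int", "").strip(); [0] of a split never raises
def pvVarOf (line : String) : String :=
  PySem.Str.strip (PySem.Str.replace (((PySem.Str.split? line "=").getD []).headD "") "int" "")

-- ===== PORT A =====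
-- body of A's first loop: live println variables, built by mutating a set
def pvStepLive (live : PySem.Set String) (line : String) : PySem.Set String :=
  if PySem.Str.isIn "println(" line then
    let var := pvPrintVar line
    if pvIsIdent var then PySem.Set.add live var else live
  else live

def pvLive (lines : List String) : PySem.Set String :=
  lines.foldl pvStepLive PySem.Set.empty

-- body of A's second (reversed) loop: state = (new_lines, live)
def pvStepA (st : List String × PySem.Set String) (line : String) : List String × PySem.Set String :=
  if PySem.Str.isIn "=" line && PySem.Str.isIn "int" line then
    let var := pvVarOf line
    if st.2.contains var then (st.1 ++ [line], PySem.Set.discard st.2 var)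
    else st  -- 'continue'
  else (st.1 ++ [line], st.2)

def remove_dead_assignments (lines : List String) : List String :=
  let live := pvLive lines
  (lines.reverse.foldl pvStepA ([], live)).1.reverse

-- ===== PORT B =====
-- B's set comprehension: {printVar(l) for l in lines if "println(" in l and printVar(l).isidentifier()}
def pvLiveB (lines : List String) : PySem.Set String :=
  PySem.Set.ofList
    ((lines.filter (fun l => PySem.Str.isIn "println(" l && pvIsIdent (pvPrintVar l))).map pvPrintVar)

-- body of B's forward loop over enumerate(lines); closes over the whole list and the live set
def pvStepB (full : List String) (live : PySem.Set String) (out : List String) (p : Int × String) : List String :=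
  if PySem.Str.isIn "=" p.2 && PySem.Str.isIn "int" p.2 then
    let var := pvVarOf p.2
    if !(PySem.Set.contains live var)
        || (PySem.List.slice full (some (p.1 + 1)) none).any
             (fun later => (PySem.Str.isIn "=" later && PySem.Str.isIn "int" later)
                           && (pvVarOf later == var))
    then out  -- 'continue'
    else out ++ [p.2]
  else out ++ [p.2]

def remove_dead_assignments_alt (lines : List String) : List String :=
  let live := pvLiveB lines
  (PySem.List.enumerate lines).foldl (pvStepB lines live) []

-- ===== PRECONDITION & SPEC =====
def Spec_remove_dead_assignments (lines : List String) (out : List String) : Prop := out = remove_dead_assignments_alt lines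
instance (lines : List String) (out : List String) : Decidable (Spec_remove_dead_assignments lines out) := by unfold Spec_remove_dead_assignments; infer_instance

-- ===== CLAIM (what is proved, stated in full; the proofs are below) =====
def Claim_equal_remove_dead_assignments : Prop := ∀ (lines : List String), Dom_remove_dead_assignments lines → Spec_remove_dead_assignments lines (remove_dead_assignments lines)

-- ===== LEMMAS AND PROOFS =====

-- is the line an int-assignment? (the test both loop bodies make)
def pvIsA (l : String) : Bool := PySem.Str.isIn "=" l && PySem.Str.isIn "int" l

-- common functional form both ports are reduced to: keep a non-assignment; keep an
-- int-assignment iff its variable is live and no later int-assignment has the same variable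
def pvFilt (live : PySem.Set String) : List String → List String
  | [] => []
  | l :: ts =>
    if pvIsA l && (!(live.contains (pvVarOf l))
                   || ts.any (fun l2 => pvIsA l2 && (pvVarOf l2 == pvVarOf l)))
    then pvFilt live ts
    else l :: pvFilt live ts

lemma pvContains_discard (s : PySem.Set String) (x v : String) :
    (PySem.Set.discard s x).contains v = (s.contains v && !(x == v)) := by
  rw [Bool.eq_iff_iff]
  simp [PySem.Set.mem_discard]
  tauto

lemma pvBool1 (a b c : Bool) : ((a && !b) && !c) = (a && !(c || b)) := by
  cases a <;> cases b <;> cases c <;> rfl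

lemma pvBool2 (a b : Bool) (h : (a && !b) = false) : (!a || b) = true := by
  cases a <;> cases b <;> simp_all

-- the two ways of building the live set contain the same variables
lemma pvLive_mem (lines : List String) (acc : PySem.Set String) (v : String) :
    v ∈ lines.foldl pvStepLive acc
    ↔ v ∈ acc ∨ ∃ l ∈ lines, (PySem.Str.isIn "println(" l && pvIsIdent (pvPrintVar l)) = true
        ∧ pvPrintVar l = v := by
  induction lines generalizing acc with
  | nil => simp
  | cons l ls ih =>
    rw [List.foldl_cons]
    by_cases h1 : PySem.Str.isIn "println(" l = true
    · by_cases h2 : pvIsIdent (pvPrintVar l) = true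
      · rw [show pvStepLive acc l = PySem.Set.add acc (pvPrintVar l) from by
            rw [pvStepLive, if_pos h1]; exact if_pos h2]
        rw [ih, PySem.Set.mem_add, List.exists_mem_cons_iff]
        have hcond : (PySem.Str.isIn "println(" l && pvIsIdent (pvPrintVar l)) = true := by
          rw [h1, h2]; rfl
        constructor
        · rintro ((h | h) | h)
          · exact Or.inl h
          · exact Or.inr (Or.inl ⟨hcond, h.symm⟩)
          · exact Or.inr (Or.inr h)
        · rintro (h | ⟨_, h⟩ | h)
          · exact Or.inl (Or.inl h)
          · exact Or.inl (Or.inr h.symm)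
          · exact Or.inr h
      · rw [show pvStepLive acc l = acc from by
            rw [pvStepLive, if_pos h1]; exact if_neg h2]
        rw [ih, List.exists_mem_cons_iff]
        constructor
        · rintro (h | h)
          · exact Or.inl h
          · exact Or.inr (Or.inr h)
        · rintro (h | ⟨hc, _⟩ | h)
          · exact Or.inl h
          · rw [Bool.and_eq_true] at hc; exact absurd hc.2 h2
          · exact Or.inr h
    · rw [show pvStepLive acc l = acc from by rw [pvStepLive]; exact if_neg h1]
      rw [ih, List.exists_mem_cons_iff]
      constructor
      · rintro (h | h)
        · exact Or.inl h
        · exact Or.inr (Or.inr h)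
      · rintro (h | ⟨hc, _⟩ | h)
        · exact Or.inl h
        · rw [Bool.and_eq_true] at hc; exact absurd hc.1 h1
        · exact Or.inr h

lemma pvLive_contains_eq (lines : List String) (v : String) :
    (pvLive lines).contains v = (pvLiveB lines).contains v := by
  rw [Bool.eq_iff_iff, PySem.Set.contains_iff, PySem.Set.contains_iff]
  rw [pvLive, pvLiveB, pvLive_mem, PySem.Set.mem_ofList]
  simp only [List.mem_map, List.mem_filter]
  constructor
  · rintro (h | ⟨l, hl, hc, hv⟩)
    · exact absurd h (by simp [PySem.Set.empty])
    · exact ⟨l, ⟨hl, hc⟩, hv⟩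
  · rintro ⟨l, ⟨hl, hc⟩, hv⟩
    exact Or.inr ⟨l, hl, hc, hv⟩

-- pvFilt only inspects the live set through `contains`
lemma pvFilt_congr (live1 live2 : PySem.Set String)
    (h : ∀ v, live1.contains v = live2.contains v) :
    ∀ ls, pvFilt live1 ls = pvFilt live2 ls := by
  intro ls
  induction ls with
  | nil => rfl
  | cons l ts ih => rw [pvFilt, pvFilt, h (pvVarOf l), ih]

-- A's reversed pass, characterised: the kept lines are pvFilt, and the final live set contains
-- exactly the initially-live variables not assigned anywhere in the processed suffix
lemma pvA_pass (ls : List String) (live : PySem.Set String) :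
    (ls.reverse.foldl pvStepA ([], live)).1.reverse = pvFilt live ls
    ∧ ∀ v, (ls.reverse.foldl pvStepA ([], live)).2.contains v
        = (live.contains v && !(ls.any (fun l => pvIsA l && (pvVarOf l == v)))) := by
  induction ls with
  | nil => exact ⟨by simp [pvFilt], by intro v; simp⟩
  | cons l ts ih =>
    obtain ⟨ih1, ih2⟩ := ih
    rw [List.reverse_cons, List.foldl_append, List.foldl_cons, List.foldl_nil]
    generalize hP : List.foldl pvStepA ([], live) ts.reverse = P at ih1 ih2 ⊢
    cases hA : (PySem.Str.isIn "=" l && PySem.Str.isIn "int" l) with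
    | true =>
      have hAl : pvIsA l = true := by rw [pvIsA]; exact hA
      cases hC : P.2.contains (pvVarOf l) with
      | true =>
        have h : live.contains (pvVarOf l) = true
            ∧ (ts.any fun l2 => pvIsA l2 && (pvVarOf l2 == pvVarOf l)) = false := by
          have h0 := (ih2 (pvVarOf l)).symm.trans hC
          rw [Bool.and_eq_true, Bool.not_eq_true'] at h0
          exact h0
        refine ⟨?_, ?_⟩
        · simp only [pvStepA]
          rw [if_pos hA, if_pos hC]
          simp only [pvFilt, hAl, Bool.true_and, h.1, h.2]
          rw [if_neg (by simp)]
          rw [List.reverse_append, ih1]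
          rfl
        · intro v
          simp only [pvStepA]
          rw [if_pos hA, if_pos hC]
          show (P.2.discard (pvVarOf l)).contains v = _
          rw [pvContains_discard, ih2 v, List.any_cons]
          simp only [hAl, Bool.true_and]
          exact pvBool1 _ _ _
      | false =>
        have hcond := (ih2 (pvVarOf l)).symm.trans hC
        refine ⟨?_, ?_⟩
        · simp only [pvStepA]
          rw [if_pos hA, if_neg (by intro hc; rw [hC] at hc; exact absurd hc (by simp))]
          simp only [pvFilt, hAl, Bool.true_and]
          rw [if_pos (pvBool2 _ _ hcond)]
          exact ih1
        · intro v
          simp only [pvStepA]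
          rw [if_pos hA, if_neg (by intro hc; rw [hC] at hc; exact absurd hc (by simp))]
          rw [ih2 v, List.any_cons]
          simp only [hAl, Bool.true_and]
          by_cases hv : pvVarOf l = v
          · subst hv
            simp only [beq_self_eq_true, Bool.true_or, Bool.not_true, Bool.and_false]
            exact hcond
          · have hbe : (pvVarOf l == v) = false := by simp [hv]
            rw [hbe, Bool.false_or]
    | false =>
      have hAl : pvIsA l = false := by rw [pvIsA]; exact hA
      refine ⟨?_, ?_⟩
      · simp only [pvStepA]
        rw [if_neg (by rw [hA]; simp)]
        simp only [pvFilt, hAl, Bool.false_and]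
        rw [if_neg (by simp)]
        rw [List.reverse_append, ih1]
        rfl
      · intro v
        simp only [pvStepA]
        rw [if_neg (by rw [hA]; simp)]
        rw [ih2 v, List.any_cons]
        simp only [hAl, Bool.false_and, Bool.false_or]

-- B's forward pass over enumerate(lines, k) where ls is the k-suffix of the full list
lemma pvB_pass (full : List String) (live : PySem.Set String) :
    ∀ (ls : List String) (k : Nat), full.drop k = ls → ∀ out,
    (PySem.List.enumerate ls (k : Int)).foldl (pvStepB full live) out = out ++ pvFilt live ls := by
  intro ls
  induction ls with
  | nil => intro k hk out; simp [pvFilt]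
  | cons l ts ih =>
    intro k hk out
    have hts : full.drop (k+1) = ts := by
      have h1 : List.drop 1 (List.drop k full) = List.drop 1 (l :: ts) := by rw [hk]
      simpa [List.drop_drop, Nat.add_comm] using h1
    have hcast : (k : Int) + 1 = ((k+1 : Nat) : Int) := by push_cast; ring
    have hslice : PySem.List.slice full (some ((k : Int) + 1)) none = ts := by
      rw [hcast, PySem.List.slice_from_natCast, hts]
    rw [PySem.List.enumerate_cons, List.foldl_cons, hcast, ih (k+1) hts]
    simp only [pvStepB, pvFilt, pvIsA, hslice]
    split_ifs <;> simp_all <;> tauto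

-- ===== VERDICT (by name: the statement is the Claim_ definition above) =====
theorem remove_dead_assignments_spec : Claim_equal_remove_dead_assignments := by
  intro lines _
  show remove_dead_assignments lines = remove_dead_assignments_alt lines
  rw [remove_dead_assignments, remove_dead_assignments_alt]
  rw [(pvA_pass lines (pvLive lines)).1]
  rw [pvFilt_congr (pvLive lines) (pvLiveB lines) (pvLive_contains_eq lines) lines]
  have hb := pvB_pass lines (pvLiveB lines) lines 0 rfl []
  simpa using hb.symm
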